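-- pv_equiv track=rewrite | github.com/LuthienResearch/luthien-proxy | src/luthien_cli/src/luthien_cli/commands/policy.py | _resolve_class_ref
-- ===== SOURCE A (Python) =====
-- def _short_name(class_ref: str) -> str:
--     """Extract class name from a full class ref like 'module.path:ClassName'."""
--     return class_ref.rsplit(":", 1)[-1] if ":" in class_ref else class_ref
--
-- def _resolve_class_ref(name: str, policies: list[dict]) -> str | None:
--     """Resolve a short name or full class_ref to the canonical class_ref.
--
--     Tries exact class_ref match first, then case-insensitive class name match.
--     Returns None if no match found.
--     """
--     for p in policies:
--         if p["class_ref"] == name: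
--             return p["class_ref"]
--
--     name_lower = name.lower()
--     for p in policies:
--         if _short_name(p["class_ref"]).lower() == name_lower:
--             return p["class_ref"]
--
--     return None
-- ===== SOURCE B (Python) =====
-- def _short_name(class_ref: str) -> str:
--     """Extract class name from a full class ref like 'module.path:ClassName'."""
--     return class_ref.rsplit(":", 1)[-1] if ":" in class_ref else class_ref
--
-- def _resolve_class_ref(name, policies):
--     """Single pass: exact match returns immediately; first case-insensitive
--     short-name match is remembered as a deferred candidate and returned only
--     after the whole scan finds no exact match."""
--     name_lower = name.lower()
--     short_match = None
--     for p in policies: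
--         ref = p["class_ref"]
--         if ref == name:
--             return ref
--         if short_match is None and _short_name(ref).lower() == name_lower:
--             short_match = ref
--     return short_match
-- ===== Notes on version B (the rewrite author's own statement) =====
-- stated objective: alternative
-- what changed: Replaced A's two sequential scans (exact-match pass, then lowercase short-name pass) by one pass that returns an exact match immediately and carries the first short-name match as a deferred candidate returned after the scan.
import Mathlib
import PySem

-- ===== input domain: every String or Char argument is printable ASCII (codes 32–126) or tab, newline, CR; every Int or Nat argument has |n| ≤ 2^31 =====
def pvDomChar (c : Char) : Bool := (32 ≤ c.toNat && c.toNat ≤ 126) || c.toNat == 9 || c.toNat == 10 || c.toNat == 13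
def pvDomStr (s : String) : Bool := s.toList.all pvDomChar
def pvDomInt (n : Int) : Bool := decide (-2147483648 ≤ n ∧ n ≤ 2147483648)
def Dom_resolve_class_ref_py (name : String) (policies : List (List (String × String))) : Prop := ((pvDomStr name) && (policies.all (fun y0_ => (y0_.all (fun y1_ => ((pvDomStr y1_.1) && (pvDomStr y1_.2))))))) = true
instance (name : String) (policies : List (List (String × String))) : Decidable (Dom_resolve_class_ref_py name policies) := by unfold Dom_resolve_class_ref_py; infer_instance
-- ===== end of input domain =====

-- B replaces A's two sequential scans by one pass that keeps a deferred
-- short-name candidate; same return value on every input where A returns.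

-- shared helper: Python _short_name (rsplit(":",1)[-1] if ":" in s else s).
-- rsplit(":", 1)[-1] on a string containing ":" is the suffix after the LAST
-- colon; the fold below computes exactly that (hand port, exact on all strings).
def pvAfterLastColon (l : List Char) : List Char :=
  l.foldl (fun acc c => if c = ':' then [] else acc ++ [c]) []

def pvShort (s : String) : String :=
  if PySem.Str.isIn ":" s then String.ofList (pvAfterLastColon s.toList) else s

-- p["class_ref"]; none = KeyError (excluded by Pre_)
def pvCref (p : List (String × String)) : Option String :=
  (PySem.Dict.mk p).get? "class_ref"

-- ===== PORT A =====
def pvFindExact (name : String) : List (List (String × String)) → Option String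
  | [] => none
  | p :: ps =>
    match pvCref p with
    | none => none
    | some cr => if cr = name then some cr else pvFindExact name ps

def pvFindShort (nl : String) : List (List (String × String)) → Option String
  | [] => none
  | p :: ps =>
    match pvCref p with
    | none => none
    | some cr => if PySem.Str.lower (pvShort cr) = nl then some cr else pvFindShort nl ps

def resolve_class_ref_py (name : String) (policies : List (List (String × String))) : Option String :=
  match pvFindExact name policies with
  | some r => some r
  | none => pvFindShort (PySem.Str.lower name) policies

-- ===== PORT B =====
def pvLoopB (name nl : String) : List (List (String × String)) → Option String → Option String
  | [], short => short
  | p :: ps, short =>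
    match pvCref p with
    | none => none
    | some cr =>
      if cr = name then some cr
      else pvLoopB name nl ps
        (if short = none ∧ PySem.Str.lower (pvShort cr) = nl then some cr else short)

def resolve_class_ref_py_alt (name : String) (policies : List (List (String × String))) : Option String :=
  pvLoopB name (PySem.Str.lower name) policies none

-- ===== PRECONDITION & SPEC =====
-- Pre_: exactly where Python A returns: either every policy dict has the key
-- "class_ref", or an exact class_ref match occurs before the first keyless
-- dict (then A's first loop returns before reaching the KeyError).
def Pre_resolve_class_ref_py (name : String) (policies : List (List (String × String))) : Prop :=
  (∀ p ∈ policies, (PySem.Dict.mk p).contains "class_ref" = true) ∨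
  (∃ p ∈ policies.takeWhile (fun p => (PySem.Dict.mk p).contains "class_ref"),
     pvCref p = some name)
instance (name : String) (policies : List (List (String × String))) : Decidable (Pre_resolve_class_ref_py name policies) := by unfold Pre_resolve_class_ref_py; infer_instance

def pvWitness_resolve_class_ref_py : String × (List (List (String × String))) :=
  ("Foo", [[("class_ref", "mod.pkg:Foo")], [("class_ref", "mod:Bar")]])

def Spec_resolve_class_ref_py (name : String) (policies : List (List (String × String))) (out : Option String) : Prop := out = resolve_class_ref_py_alt name policies
instance (name : String) (policies : List (List (String × String))) (out : Option String) : Decidable (Spec_resolve_class_ref_py name policies out) := by unfold Spec_resolve_class_ref_py; infer_instance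

-- ===== CLAIM (what is proved, stated in full; the proofs are below) =====
def Claim_equal_resolve_class_ref_py : Prop := ∀ (name : String) (policies : List (List (String × String))), Dom_resolve_class_ref_py name policies → Pre_resolve_class_ref_py name policies → Spec_resolve_class_ref_py name policies (resolve_class_ref_py name policies)

-- ===== LEMMAS AND PROOFS =====
-- loop invariant of B: the single pass with deferred candidate `short`
-- computes exact-match-first, then the candidate, then the short-name scan.
theorem pvLoopB_eq (name nl : String) (ps : List (List (String × String))) :
    ∀ short : Option String, (∀ p ∈ ps, (pvCref p).isSome = true) →
    pvLoopB name nl ps short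
      = (pvFindExact name ps).or (short.or (pvFindShort nl ps)) := by
  induction ps with
  | nil =>
    intro short _
    simp [pvLoopB, pvFindExact, pvFindShort]
  | cons p ps ih =>
    intro short h
    obtain ⟨cr, hcr⟩ := Option.isSome_iff_exists.mp (h p (List.mem_cons_self))
    have hps : ∀ q ∈ ps, (pvCref q).isSome = true := fun q hq => h q (List.mem_cons_of_mem _ hq)
    simp only [pvLoopB, pvFindExact, pvFindShort, hcr]
    by_cases he : cr = name
    · simp [he]
    · rw [if_neg he, if_neg he, ih _ hps]
      cases short with
      | some s => simp
      | none =>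
        by_cases hc : PySem.Str.lower (pvShort cr) = nl <;> simp [hc]

theorem both_eq_of_exact_prefix (name nl : String) :
    ∀ (ps : List (List (String × String))) (short : Option String),
    (∃ p ∈ ps.takeWhile (fun p => (PySem.Dict.mk p).contains "class_ref"),
       pvCref p = some name) →
    pvFindExact name ps = some name ∧ pvLoopB name nl ps short = some name := by
  intro ps
  induction ps with
  | nil => intro short h; simp at h
  | cons p ps ih =>
    intro short h
    by_cases hk : (PySem.Dict.mk p).contains "class_ref" = true
    · rw [List.takeWhile_cons_of_pos (by simpa using hk)] at h
      obtain ⟨cr, hcr⟩ := Option.isSome_iff_exists.mp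
        (by simpa [pvCref, PySem.Dict.contains_eq_isSome_get?] using hk)
      by_cases he : cr = name
      · subst he; constructor <;> simp [pvFindExact, pvLoopB, pvCref, hcr]
      · have h' : ∃ q ∈ ps.takeWhile (fun q => (PySem.Dict.mk q).contains "class_ref"),
            pvCref q = some name := by
          rcases h with ⟨q, hq, hqv⟩
          rcases List.mem_cons.mp hq with rfl | hq'
          · exact absurd (by rw [pvCref, hcr] at hqv; exact Option.some.inj hqv) he
          · exact ⟨q, hq', hqv⟩
        refine ⟨?_, ?_⟩
        · simpa [pvFindExact, pvCref, hcr, he] using (ih short h').1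
        · simpa [pvLoopB, pvCref, hcr, he] using (ih _ h').2
    · rw [List.takeWhile_cons_of_neg (by simpa using hk)] at h
      simp at h

theorem resolve_class_ref_py_eq (name : String) (policies : List (List (String × String)))
    (h : Pre_resolve_class_ref_py name policies) :
    resolve_class_ref_py name policies = resolve_class_ref_py_alt name policies := by
  rcases h with h | h
  · have h' : ∀ p ∈ policies, (pvCref p).isSome = true := by
      intro p hp
      have := h p hp
      rw [PySem.Dict.contains_eq_isSome_get?] at this
      simpa [pvCref] using this
    rw [resolve_class_ref_py_alt, pvLoopB_eq name _ policies none h']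
    unfold resolve_class_ref_py
    cases pvFindExact name policies <;> simp
  · obtain ⟨hA, hB⟩ := both_eq_of_exact_prefix name (PySem.Str.lower name) policies none h
    rw [resolve_class_ref_py, resolve_class_ref_py_alt, hA, hB]

-- ===== VERDICT (by name: the statement is the Claim_ definition above) =====
theorem resolve_class_ref_py_spec : Claim_equal_resolve_class_ref_py := by
  intro name policies _ hpre
  unfold Spec_resolve_class_ref_py
  exact resolve_class_ref_py_eq name policies hpre
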